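-- pv_equiv track=rewrite | github.com/Revi1337/BaekJoon-Coding-Test | 백준/Gold/15486. 퇴사 2/퇴사 2.py | solution
-- ===== SOURCE A (Python) =====
-- def solution(N, days):
--     dp = [0] * (N + 1)
--     for idx in range(N - 1, -1, -1):
--         if idx + days[idx][0] <= N:
--             dp[idx] = max(dp[idx + days[idx][0]] + days[idx][1], dp[idx + 1])
--         else:
--             dp[idx] = dp[idx + 1]
--
--     return max(dp)
-- ===== SOURCE B (Python) =====
-- def solution(N, days):
--     ends = [[] for _ in range(N + 1)]
--     for k in range(N):
--         t, p = days[k]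
--         if k + t <= N:
--             ends[k + t].append((k, p))
--     dp = [0] * (N + 1)
--     for j in range(1, N + 1):
--         best = dp[j - 1]
--         for k, p in ends[j]:
--             c = dp[k] + p
--             if c > best:
--                 best = c
--         dp[j] = best  # best earnings achievable among jobs finished by day j
--     return dp[N]
-- ===== Notes on version B (the rewrite author's own statement) =====
-- stated objective: alternative
-- what changed: B builds a bucket index of jobs keyed by their finishing day and fills the DP table forward (gathering each day's candidates from its bucket, returning dp[N]), instead of A's backward scan that takes the max with future dp entries and a final max over the whole table.
-- outside the precondition, e.g. on solution(1, [(0, 3)]): A returns 3, B returns 0; on solution(1, [(-1, 5)]): A returns 5, B returns 5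
import Mathlib
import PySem

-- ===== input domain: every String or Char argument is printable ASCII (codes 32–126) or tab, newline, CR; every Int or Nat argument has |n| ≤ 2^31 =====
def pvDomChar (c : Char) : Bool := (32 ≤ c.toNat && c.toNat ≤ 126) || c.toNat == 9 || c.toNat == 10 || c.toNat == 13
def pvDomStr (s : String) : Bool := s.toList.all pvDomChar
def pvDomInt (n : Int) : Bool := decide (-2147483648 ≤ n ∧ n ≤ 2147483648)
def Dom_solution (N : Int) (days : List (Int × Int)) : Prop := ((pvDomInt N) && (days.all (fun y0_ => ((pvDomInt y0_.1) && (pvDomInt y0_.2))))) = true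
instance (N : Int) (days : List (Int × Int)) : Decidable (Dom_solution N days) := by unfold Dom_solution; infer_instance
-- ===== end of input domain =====

-- B replaces A's backward gather DP (scan from day N-1 down, then max over the table) by a
-- bucket index of jobs keyed by their finishing day plus a forward gather DP returning dp[N];
-- objective: alternative (same O(N) cost, different decomposition).

-- ===== PORT A =====
def solution (N : Int) (days : List (Int × Int)) : Int :=
  let dp0 : List Int := List.replicate (N + 1).toNat 0
  let dp := (PySem.List.pyRange (N - 1) (-1) (-1)).foldl (fun dp idx =>
      let d := PySem.List.pyGetD days idx ((0 : Int), (0 : Int))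
      if idx + d.1 ≤ N then
        PySem.List.pySetD dp idx
          (max (PySem.List.pyGetD dp (idx + d.1) 0 + d.2) (PySem.List.pyGetD dp (idx + 1) 0))
      else
        PySem.List.pySetD dp idx (PySem.List.pyGetD dp (idx + 1) 0)) dp0
  (PySem.List.max? dp (fun y => y)).getD 0

-- ===== PORT B =====
def solution_alt (N : Int) (days : List (Int × Int)) : Int :=
  let ends0 : List (List (Int × Int)) := (PySem.List.pyRange 0 (N + 1) 1).map (fun _ => [])
  let ends := (PySem.List.pyRange 0 N 1).foldl (fun ends k =>
      let d := PySem.List.pyGetD days k ((0 : Int), (0 : Int))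
      if k + d.1 ≤ N then
        PySem.List.pySetD ends (k + d.1) (PySem.List.pyGetD ends (k + d.1) [] ++ [(k, d.2)])
      else ends) ends0
  let dp0 : List Int := List.replicate (N + 1).toNat 0
  let dp := (PySem.List.pyRange 1 (N + 1) 1).foldl (fun dp j =>
      let best := (PySem.List.pyGetD ends j []).foldl
          (fun best kp =>
            if PySem.List.pyGetD dp kp.1 0 + kp.2 > best then PySem.List.pyGetD dp kp.1 0 + kp.2
            else best)
          (PySem.List.pyGetD dp (j - 1) 0)
      PySem.List.pySetD dp j best) dp0
  PySem.List.pyGetD dp N 0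

-- ===== PRECONDITION & SPEC =====
-- Pre_ restricts to the problem's natural domain (BOJ 15486 guarantees 0 ≤ N, one pair per day,
-- and durations ≥ 1): it excludes N < 0 and len(days) < N, where A raises (ValueError/IndexError),
-- and nonpositive durations, where A's value comes from negative-index wraparound / reading a
-- not-yet-final dp cell — an accident of A's backward traversal that no caller is meant to rely on.
def Pre_solution (N : Int) (days : List (Int × Int)) : Prop :=
  0 ≤ N ∧ N.toNat ≤ days.length ∧ ∀ k, k < N.toNat → 1 ≤ (days.getD k (0, 0)).1
instance (N : Int) (days : List (Int × Int)) : Decidable (Pre_solution N days) := by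
  unfold Pre_solution; infer_instance
def pvWitness_solution : Int × (List (Int × Int)) := (2, [(1, 3), (2, 5)])

def Spec_solution (N : Int) (days : List (Int × Int)) (out : Int) : Prop := out = solution_alt N days
instance (N : Int) (days : List (Int × Int)) (out : Int) : Decidable (Spec_solution N days out) := by unfold Spec_solution; infer_instance

-- ===== CLAIM (what is proved, stated in full; the proofs are below) =====
def Claim_equal_solution : Prop := ∀ (N : Int) (days : List (Int × Int)), Dom_solution N days → Pre_solution N days → Spec_solution N days (solution N days)

-- ===== LEMMAS AND PROOFS =====

-- duration / profit of job k
def tD (days : List (Int × Int)) (k : Nat) : Int := (days.getD k (0, 0)).1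
def pD (days : List (Int × Int)) (k : Nat) : Int := (days.getD k (0, 0)).2

-- A's quantity: best earnings from jobs starting at day ≥ i (the value A's dp[i] holds)
def bestR (n : Nat) (days : List (Int × Int)) (i : Nat) : Int :=
  if h : i < n then
    if h2 : 1 ≤ tD days i ∧ (i : Int) + tD days i ≤ (n : Int) then
      max (bestR n days (i + (tD days i).toNat) + pD days i) (bestR n days (i + 1))
    else bestR n days (i + 1)
  else 0
termination_by n - i
decreasing_by
  all_goals omega

-- B's quantity as a table: FT n days j = [F 0, …, F j] where F j = best earnings finished by day j
def FT (n : Nat) (days : List (Int × Int)) : Nat → List Int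
  | 0 => [0]
  | j + 1 =>
    let L := FT n days j
    L ++ [((List.range n).filter (fun (k : Nat) => (k : Int) + tD days k = ((j : Int) + 1))).foldl
            (fun a k => max a (L.getD k 0 + pD days k)) (L.getD j 0)]

def F (n : Nat) (days : List (Int × Int)) (j : Nat) : Int := (FT n days j).getD j 0

theorem FT_length (n : Nat) (days : List (Int × Int)) (j : Nat) : (FT n days j).length = j + 1 := by
  induction j with
  | zero => simp [FT]
  | succ j ih => simp [FT, ih]

theorem FT_stable (n : Nat) (days : List (Int × Int)) :
    ∀ m j, j ≤ m → (FT n days m).getD j 0 = F n days j := by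
  intro m
  induction m with
  | zero => intro j hj; interval_cases j; rfl
  | succ m ih =>
    intro j hj
    rcases Nat.lt_or_ge j (m + 1) with h | h
    · rw [show FT n days (m + 1) = FT n days m ++ [((List.range n).filter
          (fun (k : Nat) => (k : Int) + tD days k = ((m : Int) + 1))).foldl
          (fun a k => max a ((FT n days m).getD k 0 + pD days k)) ((FT n days m).getD m 0)]
          from rfl]
      rw [List.getD_append _ _ _ _ (by rw [FT_length]; omega)]
      exact ih j (by omega)
    · have : j = m + 1 := by omega
      subst this; rfl

theorem F_zero (n : Nat) (days : List (Int × Int)) : F n days 0 = 0 := by simp [F, FT]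

theorem F_succ (n : Nat) (days : List (Int × Int))
    (ht : ∀ k, k < n → 1 ≤ tD days k) (j : Nat) :
    F n days (j + 1) =
      ((List.range n).filter (fun (k : Nat) => (k : Int) + tD days k = ((j : Int) + 1))).foldl
        (fun a k => max a (F n days k + pD days k)) (F n days j) := by
  have hlen := FT_length n days j
  show (FT n days j ++ [((List.range n).filter
      (fun (k : Nat) => (k : Int) + tD days k = ((j : Int) + 1))).foldl
      (fun a k => max a ((FT n days j).getD k 0 + pD days k)) ((FT n days j).getD j 0)]).getD (j+1) 0
      = _
  rw [List.getD_append_right _ _ _ _ (by omega), hlen, Nat.sub_self]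
  simp only [List.getD_cons_zero]
  rw [show (FT n days j).getD j 0 = F n days j from FT_stable n days j j le_rfl]
  refine PySem.List.foldl_congr_mem _ _ _ _ (fun acc k hk => ?_)
  rcases List.mem_filter.mp hk with ⟨hkr, hkc⟩
  have hkn : k < n := List.mem_range.mp hkr
  have ht1 := ht k hkn
  have hc : (k : Int) + tD days k = (j : Int) + 1 := by exact_mod_cast of_decide_eq_true hkc
  have hkj : k ≤ j := by omega
  rw [FT_stable n days j k hkj]

theorem F_mono (n : Nat) (days : List (Int × Int)) (ht : ∀ k, k < n → 1 ≤ tD days k)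
    {i j : Nat} (h : i ≤ j) : F n days i ≤ F n days j := by
  induction j with
  | zero => interval_cases i; rfl
  | succ j ih =>
    rcases Nat.lt_or_ge i (j + 1) with h' | h'
    · calc F n days i ≤ F n days j := ih (by omega)
        _ ≤ F n days (j + 1) := by
            rw [F_succ n days ht j]
            exact (PySem.List.le_foldl_max_int _ _ _).1
    · have : i = j + 1 := by omega
      subst this; rfl

theorem F_push (n : Nat) (days : List (Int × Int)) (ht : ∀ k, k < n → 1 ≤ tD days k)
    {k : Nat} (hk : k < n) :
    F n days k + pD days k ≤ F n days (k + (tD days k).toNat) := by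
  have ht1 := ht k hk
  have hj : k + (tD days k).toNat = (k + (tD days k).toNat - 1) + 1 := by omega
  rw [hj, F_succ n days ht _]
  refine (PySem.List.le_foldl_max_int _ _ _).2 k (List.mem_filter.mpr ⟨List.mem_range.mpr hk, ?_⟩)
  simp only [decide_eq_true_eq]
  omega

theorem bestR_of_ge (n : Nat) (days : List (Int × Int)) {i : Nat} (h : n ≤ i) :
    bestR n days i = 0 := by
  rw [bestR]; simp [Nat.not_lt.mpr h]

theorem bestR_succ_le (n : Nat) (days : List (Int × Int)) (i : Nat) :
    bestR n days (i + 1) ≤ bestR n days i := by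
  conv_rhs => rw [bestR]
  rcases Nat.lt_or_ge i n with h | h
  · rw [dif_pos h]
    split
    · exact le_max_right _ _
    · exact le_rfl
  · rw [dif_neg (by omega)]
    rw [bestR_of_ge n days (by omega)]

theorem bestR_mono (n : Nat) (days : List (Int × Int)) {i j : Nat} (h : i ≤ j) :
    bestR n days j ≤ bestR n days i := by
  induction j with
  | zero => interval_cases i; exact le_rfl
  | succ j ih =>
    rcases Nat.lt_or_ge i (j + 1) with h' | h'
    · exact le_trans (bestR_succ_le n days j) (ih (by omega))
    · have : i = j + 1 := by omega
      subst this; exact le_rfl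

-- generic: a running max either stays at its seed or equals one of the projections
theorem foldl_max_pick {α : Type} (g : α → Int) (l : List α) (init : Int) :
    l.foldl (fun a k => max a (g k)) init = init ∨
      ∃ k ∈ l, l.foldl (fun a k => max a (g k)) init = g k := by
  induction l generalizing init with
  | nil => exact Or.inl rfl
  | cons x t ih =>
    simp only [List.foldl_cons]
    rcases ih (max init (g x)) with h | ⟨k, hk, h⟩
    · rw [h]
      rcases max_choice init (g x) with h' | h'
      · exact Or.inl h'
      · exact Or.inr ⟨x, List.mem_cons_self, h'⟩
    · exact Or.inr ⟨k, List.mem_cons_of_mem _ hk, h⟩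

-- L1: a chain finished by day j ≤ i composes with the best schedule from day i
theorem L1 (n : Nat) (days : List (Int × Int)) (ht : ∀ k, k < n → 1 ≤ tD days k) :
    ∀ m i j, i ≤ n → n - i ≤ m → j ≤ i → F n days j + bestR n days i ≤ F n days n := by
  intro m
  induction m with
  | zero =>
    intro i j hi hm hj
    have : i = n := by omega
    rw [this, bestR_of_ge n days le_rfl, add_zero]
    exact F_mono n days ht (by omega)
  | succ m ih =>
    intro i j hi hm hj
    rcases Nat.lt_or_ge i n with hin | hin
    · rw [bestR, dif_pos hin]
      split
      · rename_i h2
        have ht1 := h2.1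
        have ht2 := h2.2
        have hA : F n days j + (bestR n days (i + (tD days i).toNat) + pD days i) ≤ F n days n := by
          have h1 : F n days j + pD days i ≤ F n days (i + (tD days i).toNat) := by
            have hm := F_mono n days ht hj
            have hp := F_push n days ht hin
            linarith
          have h2' : F n days (i + (tD days i).toNat) + bestR n days (i + (tD days i).toNat)
              ≤ F n days n := ih (i + (tD days i).toNat) (i + (tD days i).toNat)
            (by omega) (by omega) le_rfl
          linarith
        have hB : F n days j + bestR n days (i + 1) ≤ F n days n :=
          ih (i + 1) j (by omega) (by omega) (by omega)
        rcases max_cases (bestR n days (i + (tD days i).toNat) + pD days i)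
            (bestR n days (i + 1)) with ⟨he, _⟩ | ⟨he, _⟩ <;> rw [he]
        · linarith
        · exact hB
      · exact ih (i + 1) j (by omega) (by omega) (by omega)
    · have : i = n := by omega
      rw [this, bestR_of_ge n days le_rfl, add_zero]
      exact F_mono n days ht (by omega)

-- L2: the best chain finished by day j extends to a schedule from day 0
theorem L2 (n : Nat) (days : List (Int × Int)) (ht : ∀ k, k < n → 1 ≤ tD days k) :
    ∀ j, j ≤ n → F n days j + bestR n days j ≤ bestR n days 0 := by
  intro j
  induction j using Nat.strong_induction_on with
  | _ j ih =>
    intro hj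
    match j with
    | 0 => rw [F_zero, zero_add]
    | j + 1 =>
      rw [F_succ n days ht j]
      rcases foldl_max_pick (fun k => F n days k + pD days k)
          ((List.range n).filter (fun (k : Nat) => (k : Int) + tD days k = ((j : Int) + 1)))
          (F n days j) with hc | ⟨k, hk, hc⟩ <;> rw [hc]
      · have := bestR_succ_le n days j
        have := ih j (by omega) (by omega)
        linarith
      · rcases List.mem_filter.mp hk with ⟨hkr, hkc⟩
        have hkn : k < n := List.mem_range.mp hkr
        have ht1 := ht k hkn
        have heq : (k : Int) + tD days k = (j : Int) + 1 := by
          exact_mod_cast of_decide_eq_true hkc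
        have htn : k + (tD days k).toNat = j + 1 := by omega
        have hbk : bestR n days (k + (tD days k).toNat) + pD days k ≤ bestR n days k := by
          conv_rhs => rw [bestR]
          rw [dif_pos hkn, dif_pos ⟨ht1, by omega⟩]
          exact le_max_left _ _
        rw [htn] at hbk
        have := ih k (by omega) (by omega)
        linarith

theorem best0_eq_Fn (n : Nat) (days : List (Int × Int)) (ht : ∀ k, k < n → 1 ≤ tD days k) :
    bestR n days 0 = F n days n := by
  refine le_antisymm ?_ ?_
  · have := L1 n days ht n 0 0 (by omega) (by omega) le_rfl
    rw [F_zero] at this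
    linarith
  · have := L2 n days ht n le_rfl
    rw [bestR_of_ge n days le_rfl] at this
    linarith


-- ===== bridge: port A computes bestR =====

def bodyA (N : Int) (days : List (Int × Int)) (dp : List Int) (idx : Int) : List Int :=
  let d := PySem.List.pyGetD days idx ((0 : Int), (0 : Int))
  if idx + d.1 ≤ N then
    PySem.List.pySetD dp idx
      (max (PySem.List.pyGetD dp (idx + d.1) 0 + d.2) (PySem.List.pyGetD dp (idx + 1) 0))
  else
    PySem.List.pySetD dp idx (PySem.List.pyGetD dp (idx + 1) 0)

-- dp contents of A's loop after having processed indices ≥ i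
def DA (n : Nat) (days : List (Int × Int)) (i : Nat) : List Int :=
  (List.range (n + 1)).map (fun j => if i ≤ j then bestR n days j else 0)

theorem DA_length (n : Nat) (days : List (Int × Int)) (i : Nat) :
    (DA n days i).length = n + 1 := by simp [DA]

theorem stepA (n : Nat) (days : List (Int × Int)) (ht : ∀ k, k < n → 1 ≤ tD days k)
    {i : Nat} (hi : i < n) :
    bodyA (n : Int) days (DA n days (i + 1)) (i : Int) = DA n days i := by
  have ht1 := ht i hi
  unfold bodyA
  rw [PySem.List.pyGetD_natCast days i]
  dsimp only
  rw [show (days.getD i ((0 : Int), (0 : Int))).1 = tD days i from rfl,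
    show (days.getD i ((0 : Int), (0 : Int))).2 = pD days i from rfl]
  by_cases hg : (i : Int) + tD days i ≤ (n : Int)
  · rw [if_pos hg]
    have hcast : (i : Int) + tD days i = ((i + (tD days i).toNat : Nat) : Int) := by
      push_cast; omega
    rw [hcast]
    rw [PySem.List.pyGetD_natCast, PySem.List.pySetD_natCast]
    have hc1 : ((i : Int) + 1) = (((i + 1 : Nat)) : Int) := by push_cast; ring
    rw [hc1, PySem.List.pyGetD_natCast]
    have hg1 : (DA n days (i + 1)).getD (i + (tD days i).toNat) 0
        = bestR n days (i + (tD days i).toNat) := by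
      rw [DA, PySem.List.getD_map_range _ _ _ _ (by omega)]
      rw [if_pos (by omega)]
    have hg2 : (DA n days (i + 1)).getD (i + 1) 0 = bestR n days (i + 1) := by
      rw [DA, PySem.List.getD_map_range _ _ _ _ (by omega)]
      rw [if_pos le_rfl]
    rw [hg1, hg2]
    refine List.ext_getElem (by simp [DA]) (fun j hj1 hj2 => ?_)
    rw [List.getElem_set]
    simp only [DA, List.getElem_map, List.getElem_range]
    have hjn : j < n + 1 := by simpa [DA] using hj2
    by_cases hij : i = j
    · subst hij
      rw [if_pos rfl, if_pos le_rfl]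
      conv_rhs => rw [bestR]
      rw [dif_pos hi, dif_pos ⟨ht1, hg⟩]
    · rw [if_neg hij]
      split_ifs <;> first | rfl | omega
  · rw [if_neg hg]
    have hc1 : ((i : Int) + 1) = (((i + 1 : Nat)) : Int) := by push_cast; ring
    rw [hc1, PySem.List.pyGetD_natCast, PySem.List.pySetD_natCast]
    have hg2 : (DA n days (i + 1)).getD (i + 1) 0 = bestR n days (i + 1) := by
      rw [DA, PySem.List.getD_map_range _ _ _ _ (by omega)]
      rw [if_pos le_rfl]
    rw [hg2]
    refine List.ext_getElem (by simp [DA]) (fun j hj1 hj2 => ?_)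
    rw [List.getElem_set]
    simp only [DA, List.getElem_map, List.getElem_range]
    by_cases hij : i = j
    · subst hij
      rw [if_pos rfl, if_pos le_rfl]
      conv_rhs => rw [bestR]
      rw [dif_pos hi, dif_neg (by intro hcon; exact hg hcon.2)]
    · rw [if_neg hij]
      split_ifs <;> first | rfl | omega

theorem loopA (n : Nat) (days : List (Int × Int)) (ht : ∀ k, k < n → 1 ≤ tD days k) :
    ∀ i, i ≤ n →
      (PySem.List.pyRange ((i : Int) - 1) (-1) (-1)).foldl (bodyA (n : Int) days) (DA n days i)
        = DA n days 0 := by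
  intro i
  induction i with
  | zero =>
    intro _
    rw [PySem.List.pyRange_neg_one_eq_nil (by norm_num)]
    rfl
  | succ i ih =>
    intro hi
    have hc : ((i + 1 : Nat) : Int) - 1 = (i : Int) := by push_cast; ring
    rw [hc, PySem.List.pyRange_neg_one_cons (by omega), List.foldl_cons,
      stepA n days ht (by omega : i < n)]
    exact ih (by omega)

theorem foldl_max_const {t : List Int} {a : Int} (hb : ∀ y ∈ t, y ≤ a) : t.foldl max a = a := by
  rcases PySem.List.foldl_max_mem t a with h | h
  · exact h
  · exact le_antisymm (hb _ h) (PySem.List.le_foldl_max t a).1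

theorem solution_eq_best (N : Int) (days : List (Int × Int)) (h : Pre_solution N days) :
    solution N days = bestR N.toNat days 0 := by
  obtain ⟨h0, hlen, ht'⟩ := h
  have hN : ((N.toNat : Nat) : Int) = N := Int.toNat_of_nonneg h0
  set n := N.toNat with hn
  have ht : ∀ k, k < n → 1 ≤ tD days k := fun k hk => ht' k hk
  have e1 : solution N days =
      (PySem.List.max? ((PySem.List.pyRange (N - 1) (-1) (-1)).foldl (bodyA N days)
        (List.replicate (N + 1).toNat 0)) (fun y => y)).getD 0 := rfl
  rw [e1, ← hN]
  have hdp0 : List.replicate (((n : Int) + 1)).toNat 0 = DA n days n := by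
    refine List.ext_getElem (by rw [List.length_replicate, DA_length]; omega) (fun j hj1 hj2 => ?_)
    have hjn : j < n + 1 := by simpa [DA] using hj2
    simp only [List.getElem_replicate, DA, List.getElem_map, List.getElem_range]
    split_ifs with hc
    · have : j = n := by omega
      subst this
      rw [bestR_of_ge n days le_rfl]
    · rfl
  rw [hdp0, loopA n days ht n le_rfl]
  have hDA0 : DA n days 0 = bestR n days 0 ::
      (List.range n).map (fun k => bestR n days (k + 1)) := by
    simp only [DA, Nat.zero_le, if_true]
    rw [List.range_succ_eq_map]
    simp [Nat.succ_eq_add_one]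
  rw [hDA0, PySem.List.max?_id_cons]
  simp only [Option.getD_some]
  refine foldl_max_const (fun y hy => ?_)
  rcases List.mem_map.mp hy with ⟨k, _, rfl⟩
  exact bestR_mono n days (Nat.zero_le _)

-- ===== bridge: port B computes F =====

def bodyE (N : Int) (days : List (Int × Int)) (ends : List (List (Int × Int))) (k : Int) :
    List (List (Int × Int)) :=
  let d := PySem.List.pyGetD days k ((0 : Int), (0 : Int))
  if k + d.1 ≤ N then
    PySem.List.pySetD ends (k + d.1) (PySem.List.pyGetD ends (k + d.1) [] ++ [(k, d.2)])
  else ends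

def bodyD (ends : List (List (Int × Int))) (dp : List Int) (j : Int) : List Int :=
  let best := (PySem.List.pyGetD ends j []).foldl
      (fun best kp =>
        if PySem.List.pyGetD dp kp.1 0 + kp.2 > best then PySem.List.pyGetD dp kp.1 0 + kp.2
        else best)
      (PySem.List.pyGetD dp (j - 1) 0)
  PySem.List.pySetD dp j best

-- bucket table after the first m jobs have been distributed
def EB (n : Nat) (days : List (Int × Int)) (m : Nat) : List (List (Int × Int)) :=
  (List.range (n + 1)).map (fun (j : Nat) =>
    ((List.range m).filter (fun (k : Nat) => (k : Int) + tD days k = (j : Int))).map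
      (fun (k : Nat) => ((k : Int), pD days k)))

theorem EB_length (n : Nat) (days : List (Int × Int)) (m : Nat) :
    (EB n days m).length = n + 1 := by simp [EB]

theorem stepE (n : Nat) (days : List (Int × Int)) (ht : ∀ k, k < n → 1 ≤ tD days k)
    {m : Nat} (hm : m < n) :
    bodyE (n : Int) days (EB n days m) (m : Int) = EB n days (m + 1) := by
  have ht1 := ht m hm
  unfold bodyE
  rw [PySem.List.pyGetD_natCast days m]
  dsimp only
  rw [show (days.getD m ((0 : Int), (0 : Int))).1 = tD days m from rfl,
    show (days.getD m ((0 : Int), (0 : Int))).2 = pD days m from rfl]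
  by_cases hg : (m : Int) + tD days m ≤ (n : Int)
  · rw [if_pos hg]
    have hcast : (m : Int) + tD days m = ((m + (tD days m).toNat : Nat) : Int) := by
      push_cast; omega
    rw [hcast, PySem.List.pyGetD_natCast, PySem.List.pySetD_natCast]
    have hb : (EB n days m).getD (m + (tD days m).toNat) []
        = ((List.range m).filter
            (fun (k : Nat) => (k : Int) + tD days k = ((m + (tD days m).toNat : Nat) : Int))).map
            (fun (k : Nat) => ((k : Int), pD days k)) := by
      rw [EB, PySem.List.getD_map_range _ _ _ _ (by omega)]
    rw [hb]
    refine List.ext_getElem (by simp [EB]) (fun j hj1 hj2 => ?_)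
    rw [List.getElem_set]
    simp only [EB, List.getElem_map, List.getElem_range]
    have hjn : j < n + 1 := by simpa [EB] using hj2
    rw [List.range_succ, List.filter_append]
    by_cases hij : m + (tD days m).toNat = j
    · rw [if_pos hij]
      subst hij
      have : List.filter (fun (k : Nat) =>
          decide ((k : Int) + tD days k = ((m + (tD days m).toNat : Nat) : Int))) [m] = [m] := by
        rw [List.filter_singleton,
          decide_eq_true (show ((m : Int)) + tD days m = ((m + (tD days m).toNat : Nat) : Int)
            by push_cast; omega)]
        rfl
      rw [this, List.map_append]
      rfl
    · rw [if_neg hij]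
      have : List.filter (fun (k : Nat) =>
          decide ((k : Int) + tD days k = (j : Int))) [m] = [] := by
        rw [List.filter_singleton,
          decide_eq_false (show ¬(((m : Int)) + tD days m = ((j : Nat) : Int)) by
            intro hcon; rw [hcast] at hcon; exact hij (by exact_mod_cast hcon))]
        rfl
      rw [this, List.append_nil]
  · rw [if_neg hg]
    refine List.ext_getElem (by simp [EB]) (fun j hj1 hj2 => ?_)
    simp only [EB, List.getElem_map, List.getElem_range]
    have hjn : j < n + 1 := by simpa [EB] using hj1
    rw [List.range_succ, List.filter_append]
    have : List.filter (fun (k : Nat) =>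
        decide ((k : Int) + tD days k = (j : Int))) [m] = [] := by
      rw [List.filter_singleton,
        decide_eq_false (show ¬(((m : Int)) + tD days m = ((j : Nat) : Int)) by
          push_cast; omega)]
      rfl
    rw [this, List.append_nil]

theorem loopE (n : Nat) (days : List (Int × Int)) (ht : ∀ k, k < n → 1 ≤ tD days k) :
    ∀ m, m ≤ n →
      (PySem.List.pyRange 0 (m : Int) 1).foldl (bodyE (n : Int) days) (EB n days 0)
        = EB n days m := by
  intro m
  induction m with
  | zero =>
    intro _
    rw [PySem.List.pyRange_one_eq_nil (by omega)]
    rfl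
  | succ m ih =>
    intro hm
    have hc : ((m + 1 : Nat) : Int) = (m : Int) + 1 := by push_cast; ring
    rw [hc, PySem.List.pyRange_one_succ_right (by omega), List.foldl_append, List.foldl_cons,
      List.foldl_nil, ih (by omega), stepE n days ht (by omega : m < n)]

-- dp contents of B's second loop after the first m days have been filled in
def GB (n : Nat) (days : List (Int × Int)) (m : Nat) : List Int :=
  (List.range (n + 1)).map (fun j => if j ≤ m then F n days j else 0)

theorem if_gt_eq_max (a c : Int) : (if c > a then c else a) = max a c := by
  rcases max_cases a c with ⟨he, hc⟩ | ⟨he, hc⟩ <;> rw [he] <;> split_ifs <;> first | rfl | omega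

theorem GB_length (n : Nat) (days : List (Int × Int)) (m : Nat) :
    (GB n days m).length = n + 1 := by simp [GB]

theorem stepD (n : Nat) (days : List (Int × Int)) (ht : ∀ k, k < n → 1 ≤ tD days k)
    {m : Nat} (hm : m < n) :
    bodyD (EB n days n) (GB n days m) ((m : Int) + 1) = GB n days (m + 1) := by
  unfold bodyD
  dsimp only
  have hc1 : ((m : Int) + 1) = (((m + 1 : Nat)) : Int) := by push_cast; ring
  have hc2 : ((m : Int) + 1 - 1) = ((m : Nat) : Int) := by push_cast; ring
  rw [hc2, PySem.List.pyGetD_natCast (GB n days m) m]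
  rw [hc1, PySem.List.pyGetD_natCast (EB n days n), PySem.List.pySetD_natCast]
  have hb : (EB n days n).getD (m + 1) []
      = ((List.range n).filter
          (fun (k : Nat) => (k : Int) + tD days k = ((m + 1 : Nat) : Int))).map
          (fun (k : Nat) => ((k : Int), pD days k)) := by
    rw [EB, PySem.List.getD_map_range _ _ _ _ (by omega)]
  have hinit : (GB n days m).getD m 0 = F n days m := by
    rw [GB, PySem.List.getD_map_range _ _ _ _ (by omega), if_pos le_rfl]
  rw [hb, hinit]
  have hinner : (((List.range n).filter
        (fun (k : Nat) => (k : Int) + tD days k = ((m + 1 : Nat) : Int))).map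
        (fun (k : Nat) => ((k : Int), pD days k))).foldl
      (fun best kp =>
        if PySem.List.pyGetD (GB n days m) kp.1 0 + kp.2 > best then
          PySem.List.pyGetD (GB n days m) kp.1 0 + kp.2
        else best) (F n days m) = F n days (m + 1) := by
    rw [List.foldl_map]
    refine Eq.trans (PySem.List.foldl_congr_mem _ _
      (fun a (k : Nat) => max a (F n days k + pD days k)) _ ?_) ?_
    · intro acc k hk
      rcases List.mem_filter.mp hk with ⟨hkr, hkc⟩
      have hkn : k < n := List.mem_range.mp hkr
      have ht1 := ht k hkn
      have heq : (k : Int) + tD days k = ((m + 1 : Nat) : Int) := of_decide_eq_true hkc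
      have hkm : k ≤ m := by push_cast at heq; omega
      show (if PySem.List.pyGetD (GB n days m) (k : Int) 0 + pD days k > acc then
          PySem.List.pyGetD (GB n days m) (k : Int) 0 + pD days k else acc) = _
      rw [PySem.List.pyGetD_natCast (GB n days m) k, GB,
        PySem.List.getD_map_range _ _ _ _ (by omega), if_pos hkm]
      exact if_gt_eq_max acc (F n days k + pD days k)
    · have hfilt : ((List.range n).filter
          (fun (k : Nat) => (k : Int) + tD days k = ((m + 1 : Nat) : Int)))
          = ((List.range n).filter
            (fun (k : Nat) => (k : Int) + tD days k = ((m : Int) + 1))) := by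
        refine List.filter_congr (fun k _ => ?_)
        simp only [decide_eq_decide]
        push_cast
        omega
      rw [hfilt, ← F_succ n days ht m]
  rw [hinner]
  refine List.ext_getElem (by rw [List.length_set, GB_length, GB_length])
    (fun j hj1 hj2 => ?_)
  rw [List.getElem_set]
  simp only [GB, List.getElem_map, List.getElem_range]
  by_cases hij : m + 1 = j
  · subst hij
    rw [if_pos rfl, if_pos le_rfl]
  · rw [if_neg hij]
    split_ifs <;> first | rfl | omega

theorem loopD (n : Nat) (days : List (Int × Int)) (ht : ∀ k, k < n → 1 ≤ tD days k) :
    ∀ m, m ≤ n →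
      (PySem.List.pyRange 1 ((m : Int) + 1) 1).foldl (bodyD (EB n days n)) (GB n days 0)
        = GB n days m := by
  intro m
  induction m with
  | zero =>
    intro _
    rw [PySem.List.pyRange_one_eq_nil (by omega)]
    rfl
  | succ m ih =>
    intro hm
    have hc : ((m + 1 : Nat) : Int) + 1 = ((m : Int) + 1) + 1 := by push_cast; ring
    rw [hc, PySem.List.pyRange_one_succ_right (by omega), List.foldl_append, List.foldl_cons,
      List.foldl_nil, ih (by omega), stepD n days ht (by omega : m < n)]

theorem solution_alt_eq_F (N : Int) (days : List (Int × Int)) (h : Pre_solution N days) :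
    solution_alt N days = F N.toNat days N.toNat := by
  obtain ⟨h0, hlen, ht'⟩ := h
  have hN : ((N.toNat : Nat) : Int) = N := Int.toNat_of_nonneg h0
  set n := N.toNat with hn
  have ht : ∀ k, k < n → 1 ≤ tD days k := fun k hk => ht' k hk
  have e1 : solution_alt N days =
      PySem.List.pyGetD ((PySem.List.pyRange 1 (N + 1) 1).foldl
        (bodyD ((PySem.List.pyRange 0 N 1).foldl (bodyE N days)
          ((PySem.List.pyRange 0 (N + 1) 1).map (fun _ => []))))
        (List.replicate (N + 1).toNat 0)) N 0 := rfl
  rw [e1, ← hN]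
  have hE0 : ((PySem.List.pyRange 0 ((n : Int) + 1) 1).map
      (fun _ => ([] : List (Int × Int)))) = EB n days 0 := by
    refine List.ext_getElem
      (by rw [List.length_map, PySem.List.length_pyRange_one, EB_length]; omega)
      (fun j hj1 hj2 => ?_)
    simp only [List.getElem_map, EB, List.range_zero, List.filter_nil, List.map_nil]
  have hG0 : List.replicate (((n : Int) + 1)).toNat 0 = GB n days 0 := by
    refine List.ext_getElem (by rw [List.length_replicate, GB_length]; omega) (fun j hj1 hj2 => ?_)
    have hjn : j < n + 1 := by simpa [GB] using hj2
    simp only [List.getElem_replicate, GB, List.getElem_map, List.getElem_range]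
    split_ifs with hc
    · have : j = 0 := by omega
      subst this
      rw [← F_zero n days]
    · rfl
  rw [hE0, hG0, loopE n days ht n le_rfl, loopD n days ht n le_rfl]
  rw [PySem.List.pyGetD_natCast, GB, PySem.List.getD_map_range _ _ _ _ (by omega), if_pos le_rfl]

-- ===== VERDICT (by name: the statement is the Claim_ definition above) =====
theorem solution_spec : Claim_equal_solution := by
  intro N days _ hpre
  unfold Spec_solution
  rw [solution_eq_best N days hpre, solution_alt_eq_F N days hpre]
  exact best0_eq_Fn N.toNat days (fun k hk => hpre.2.2 k hk)
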